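-- pv_equiv track=rewrite | github.com/lukemun/DotsBoxesAI | utils.py | assemble_state
-- ===== SOURCE A (Python) =====
-- def assemble_state(dim, game_record):
-- 	game_state = []
-- 	i = 0
-- 	for x in range(dim*2+1):
-- 		if x%2==0:
-- 			game_state.append(game_record[i:i+3])
-- 			i += 3
-- 		else:
-- 			game_state.append(game_record[i:i+4])
-- 			i += 4
-- 	return game_state
-- ===== SOURCE B (Python) =====
-- def assemble_state(dim, game_record):
--     widths = [3 if x % 2 == 0 else 4 for x in range(dim * 2 + 1)]
--     bounds = [0]
--     t = 0
--     for w in widths: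
--         t += w
--         bounds.append(t)
--     return [game_record[a:b] for a, b in zip(bounds, bounds[1:])]
-- ===== Notes on version B (the rewrite author's own statement) =====
-- stated objective: alternative
-- what changed: B precomputes the alternating width pattern and a prefix-sum boundary table, then slices the record between consecutive boundaries, instead of threading a running index through a parity branch inside the loop.
import Mathlib
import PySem

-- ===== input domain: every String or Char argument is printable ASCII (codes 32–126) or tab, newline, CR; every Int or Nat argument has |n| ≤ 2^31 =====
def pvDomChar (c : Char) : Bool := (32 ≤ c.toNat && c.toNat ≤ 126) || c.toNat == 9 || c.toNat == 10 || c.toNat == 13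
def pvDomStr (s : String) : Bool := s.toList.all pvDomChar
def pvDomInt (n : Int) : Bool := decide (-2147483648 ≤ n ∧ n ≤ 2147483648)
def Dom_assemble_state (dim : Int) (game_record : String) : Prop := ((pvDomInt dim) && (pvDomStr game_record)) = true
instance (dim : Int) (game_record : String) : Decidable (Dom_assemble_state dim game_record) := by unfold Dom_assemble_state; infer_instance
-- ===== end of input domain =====

-- B replaces A's running-index parity loop by a precomputed width pattern, a prefix-sum
-- boundary table, and slicing between consecutive boundaries (alternative decomposition).


-- ===== PORT A =====
def assemble_state (dim : Int) (game_record : String) : List String :=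
  ((PySem.List.pyRange 0 (dim * 2 + 1) 1).foldl
    (fun (st : List String × Int) x =>
      if PySem.Int.mod x 2 = 0 then
        (st.1 ++ [PySem.Str.slice game_record (some st.2) (some (st.2 + 3))], st.2 + 3)
      else
        (st.1 ++ [PySem.Str.slice game_record (some st.2) (some (st.2 + 4))], st.2 + 4))
    ([], 0)).1

-- ===== PORT B =====
def assemble_state_alt (dim : Int) (game_record : String) : List String :=
  let widths : List Int :=
    (PySem.List.pyRange 0 (dim * 2 + 1) 1).map (fun x => if PySem.Int.mod x 2 = 0 then 3 else 4)
  let bt := widths.foldl (fun (st : List Int × Int) w => (st.1 ++ [st.2 + w], st.2 + w)) ([0], 0)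
  let bounds := bt.1
  (bounds.zip (PySem.List.slice bounds (some 1) none)).map
    (fun p => PySem.Str.slice game_record (some p.1) (some p.2))

-- ===== PRECONDITION & SPEC =====
def Spec_assemble_state (dim : Int) (game_record : String) (out : List String) : Prop := out = assemble_state_alt dim game_record
instance (dim : Int) (game_record : String) (out : List String) : Decidable (Spec_assemble_state dim game_record out) := by unfold Spec_assemble_state; infer_instance

-- ===== CLAIM (what is proved, stated in full; the proofs are below) =====
def Claim_equal_assemble_state : Prop := ∀ (dim : Int) (game_record : String), Dom_assemble_state dim game_record → Spec_assemble_state dim game_record (assemble_state dim game_record)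

-- ===== LEMMAS AND PROOFS =====

/-- The row list both programs produce: for each width `w`, the slice `[i, i+w)`, advancing `i`. -/
def pvRows (rec : String) (i : Int) : List Int → List String
  | [] => []
  | w :: ws => PySem.Str.slice rec (some i) (some (i + w)) :: pvRows rec (i + w) ws

/-- Prefix sums starting at `i`. -/
def pvPrefixes (i : Int) : List Int → List Int
  | [] => [i]
  | w :: ws => i :: pvPrefixes (i + w) ws

theorem pvFoldA (rec : String) (xs : List Int) :
    ∀ (acc : List String) (i : Int),
      (xs.foldl
        (fun (st : List String × Int) x =>
          if PySem.Int.mod x 2 = 0 then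
            (st.1 ++ [PySem.Str.slice rec (some st.2) (some (st.2 + 3))], st.2 + 3)
          else
            (st.1 ++ [PySem.Str.slice rec (some st.2) (some (st.2 + 4))], st.2 + 4))
        (acc, i)).1
      = acc ++ pvRows rec i (xs.map (fun x => if PySem.Int.mod x 2 = 0 then 3 else 4)) := by
  induction xs with
  | nil => intro acc i; simp [pvRows]
  | cons x xs ih =>
    intro acc i
    by_cases h : PySem.Int.mod x 2 = 0
    · simp only [List.foldl_cons, List.map_cons, if_pos h, pvRows]
      rw [ih]; simp [List.append_assoc]
    · simp only [List.foldl_cons, List.map_cons, if_neg h, pvRows]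
      rw [ih]; simp [List.append_assoc]

theorem pvFoldB (ws : List Int) :
    ∀ (init : List Int) (i : Int),
      (ws.foldl (fun (st : List Int × Int) w => (st.1 ++ [st.2 + w], st.2 + w)) (init ++ [i], i)).1
      = init ++ pvPrefixes i ws := by
  induction ws with
  | nil => intro init i; simp [pvPrefixes]
  | cons w ws ih =>
    intro init i
    have := ih (init ++ [i]) (i + w)
    simp [List.foldl_cons, pvPrefixes, List.append_assoc] at this ⊢
    exact this

theorem pvZipRows (rec : String) (ws : List Int) :
    ∀ (i : Int),
      ((pvPrefixes i ws).zip (pvPrefixes i ws).tail).map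
        (fun p => PySem.Str.slice rec (some p.1) (some p.2))
      = pvRows rec i ws := by
  induction ws with
  | nil => intro i; simp [pvPrefixes, pvRows]
  | cons w ws ih =>
    intro i
    cases ws with
    | nil => simp [pvPrefixes, pvRows]
    | cons w2 ws2 =>
      have := ih (i + w)
      simp [pvPrefixes, pvRows] at this ⊢
      exact this

-- ===== VERDICT (by name: the statement is the Claim_ definition above) =====
theorem assemble_state_spec : Claim_equal_assemble_state := by
  intro dim game_record _
  unfold Spec_assemble_state assemble_state assemble_state_alt
  rw [pvFoldA game_record _ [] 0]
  have hB := pvFoldB ((PySem.List.pyRange 0 (dim * 2 + 1) 1).map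
      (fun x => if PySem.Int.mod x 2 = 0 then 3 else 4)) [] 0
  simp only [List.nil_append] at hB
  simp only [hB, PySem.List.slice_from_one]
  rw [pvZipRows]
  simp
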